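-- pv_equiv track=rewrite | github.com/JlNJl/coding | 剑指/动态计算.py | runningSum1
-- ===== SOURCE A (Python) =====
-- def runningSum1(nums: list[int]) -> list[int]:
--     l=[]
--     for i in range(0,len(nums)):
--         if i>0:
--             l.append(nums[i]+l[i-1])
--         if i == 0:
--             l.append(nums[i])
--     return l
-- ===== SOURCE B (Python) =====
-- def runningSum1(nums: list[int]) -> list[int]:
--     # Two-stage, back-to-front construction: the prefix sum ending at position i
--     # equals the grand total minus the suffix sum after i, so walk the list in
--     # reverse, emitting the remaining total and subtracting each element.
--     total = sum(nums)
--     res = []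
--     for x in reversed(nums):
--         res.append(total)
--         total -= x
--     res.reverse()
--     return res
-- ===== Notes on version B (the rewrite author's own statement) =====
-- stated objective: alternative
-- what changed: Instead of A's forward index loop that re-reads l[i-1] with i==0/i>0 branches, B first computes the grand total and then traverses the list in reverse, building the output back-to-front from suffix-subtracted totals and reversing it at the end.
import Mathlib
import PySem

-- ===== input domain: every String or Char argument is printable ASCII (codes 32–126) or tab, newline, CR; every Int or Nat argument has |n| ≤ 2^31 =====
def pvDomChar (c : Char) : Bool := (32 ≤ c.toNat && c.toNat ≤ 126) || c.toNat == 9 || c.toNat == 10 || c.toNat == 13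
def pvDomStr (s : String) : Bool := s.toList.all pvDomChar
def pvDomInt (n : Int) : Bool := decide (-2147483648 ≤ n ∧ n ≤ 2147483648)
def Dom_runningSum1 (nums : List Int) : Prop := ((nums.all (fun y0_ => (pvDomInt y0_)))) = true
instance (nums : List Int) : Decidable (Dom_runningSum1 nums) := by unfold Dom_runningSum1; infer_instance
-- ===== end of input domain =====

-- B replaces A's forward index loop (which re-reads l[i-1], with i==0/i>0 branches) by a
-- two-stage back-to-front construction: total = sum(nums), then a reverse traversal emitting
-- the remaining total and subtracting each element, reversing the collected list at the end.

-- ===== PORT A =====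
-- l = []; for i in range(0, len(nums)): if i>0: l.append(nums[i]+l[i-1]); if i==0: l.append(nums[i])
def runningSum1 (nums : List Int) : List Int :=
  (PySem.List.pyRange 0 (nums.length : Int) 1).foldl
    (fun l i =>
      let l1 := if i > 0 then l ++ [PySem.List.pyGetD nums i 0 + PySem.List.pyGetD l (i - 1) 0] else l
      if i == 0 then l1 ++ [PySem.List.pyGetD nums i 0] else l1)
    []

-- ===== PORT B =====
-- total = sum(nums); res = []; for x in reversed(nums): res.append(total); total -= x; res.reverse()
def runningSum1_alt (nums : List Int) : List Int :=
  let total := nums.sum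
  let p := nums.reverse.foldl (fun (st : List Int × Int) x => (st.1 ++ [st.2], st.2 - x)) ([], total)
  p.1.reverse

-- ===== PRECONDITION & SPEC =====
def Spec_runningSum1 (nums : List Int) (out : List Int) : Prop := out = runningSum1_alt nums
instance (nums : List Int) (out : List Int) : Decidable (Spec_runningSum1 nums out) := by unfold Spec_runningSum1; infer_instance

-- ===== CLAIM (what is proved, stated in full; the proofs are below) =====
def Claim_equal_runningSum1 : Prop := ∀ (nums : List Int), Dom_runningSum1 nums → Spec_runningSum1 nums (runningSum1 nums)

-- ===== LEMMAS AND PROOFS =====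

-- prefix sums as a simple structural recursion: common reference point for both ports
def rsGo (total : Int) : List Int → List Int
  | [] => []
  | x :: xs => (total + x) :: rsGo (total + x) xs

theorem rsGo_append_singleton (xs : List Int) (y : Int) : ∀ t, rsGo t (xs ++ [y]) = rsGo t xs ++ [t + xs.sum + y] := by
  induction xs with
  | nil => intro t; simp [rsGo]
  | cons x xs ih =>
      intro t
      simp only [List.cons_append, rsGo, ih (t + x), List.sum_cons]
      ring_nf

theorem rsGo_length (xs : List Int) : ∀ t, (rsGo t xs).length = xs.length := by
  induction xs with
  | nil => intro t; simp [rsGo]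
  | cons x xs ih => intro t; simp [rsGo, ih]

theorem rsGo_last (xs : List Int) (hx : xs ≠ []) (t : Int) :
    PySem.List.pyGetD (rsGo t xs) ((xs.length : Int) - 1) 0 = t + xs.sum := by
  induction xs using List.reverseRecOn with
  | nil => exact absurd rfl hx
  | append_singleton ys y _ => ?_
  rw [rsGo_append_singleton]
  have hlen : ((ys ++ [y]).length : Int) - 1 = ((ys.length : Nat) : Int) := by
    simp
  rw [hlen, PySem.List.pyGetD_natCast]
  have : (rsGo t ys ++ [t + ys.sum + y]).getD ys.length 0 = t + ys.sum + y := by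
    have h := rsGo_length ys t
    rw [List.getD_eq_getElem?_getD, List.getElem?_append_right (by omega)]
    simp [h]
  rw [this]
  simp [List.sum_append]
  ring

theorem runningSum1_loop (nums : List Int) : ∀ n : Nat, n ≤ nums.length →
    (PySem.List.pyRange 0 (n : Int) 1).foldl
      (fun l i =>
        let l1 := if i > 0 then l ++ [PySem.List.pyGetD nums i 0 + PySem.List.pyGetD l (i - 1) 0] else l
        if i == 0 then l1 ++ [PySem.List.pyGetD nums i 0] else l1)
      [] = rsGo 0 (nums.take n) := by
  intro n hn
  induction n with
  | zero => simp [rsGo]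
  | succ n ih =>
      have hrange : PySem.List.pyRange 0 ((n + 1 : Nat) : Int) 1
          = PySem.List.pyRange 0 (n : Int) 1 ++ [(n : Int)] := by
        have : ((n + 1 : Nat) : Int) = (n : Int) + 1 := by push_cast; ring
        rw [this, PySem.List.pyRange_one_succ_right (by positivity)]
      rw [hrange, List.foldl_append, ih (by omega)]
      have hnlt : n < nums.length := by omega
      have htake : nums.take (n + 1) = nums.take n ++ [nums[n]] := by
        rw [List.take_add_one]
        simp [List.getElem?_eq_getElem hnlt]
      by_cases h0 : n = 0
      · subst h0
        simp only [List.foldl_cons, List.foldl_nil]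
        norm_num
        rw [htake]
        simp only [List.take_zero, List.nil_append, rsGo]
        have : PySem.List.pyGetD nums (0 : Int) 0 = nums[0] := by
          have h0 : ((0:Nat) : Int) = (0 : Int) := rfl
          rw [← h0, PySem.List.pyGetD_natCast, List.getD_eq_getElem?_getD,
            List.getElem?_eq_getElem hnlt]
          rfl
        simp [this]
      · simp only [List.foldl_cons, List.foldl_nil]
        have hpos : ((n : Int) > 0) := by exact_mod_cast Nat.pos_of_ne_zero h0
        rw [if_neg (show ¬ (((n : Int) == 0) = true) by simp; omega), if_pos hpos]
        have hne : nums.take n ≠ [] := by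
          intro h
          rcases List.take_eq_nil_iff.mp h with h' | h'
          · exact h0 h'
          · rw [h'] at hnlt; simp at hnlt
        have hlast : PySem.List.pyGetD (rsGo 0 (nums.take n)) ((n : Int) - 1) 0
            = (nums.take n).sum := by
          have hl : ((nums.take n).length : Int) = (n : Int) := by
            simp [List.length_take]; omega
          have := rsGo_last (nums.take n) hne 0
          rw [hl] at this
          simpa using this
        rw [hlast, htake, rsGo_append_singleton]
        have : PySem.List.pyGetD nums ((n : Nat) : Int) 0 = nums[n] := by
          rw [PySem.List.pyGetD_natCast, List.getD_eq_getElem?_getD,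
            List.getElem?_eq_getElem hnlt]
          rfl
        rw [this]
        ring_nf

-- the sequence of remaining totals emitted by B's reverse loop
def rsBack (t : Int) : List Int → List Int
  | [] => []
  | x :: xs => t :: rsBack (t - x) xs

theorem foldl_back (xs : List Int) : ∀ (res : List Int) (t : Int),
    xs.foldl (fun (st : List Int × Int) x => (st.1 ++ [st.2], st.2 - x)) (res, t)
      = (res ++ rsBack t xs, t - xs.sum) := by
  induction xs with
  | nil => intro res t; simp [rsBack]
  | cons x xs ih =>
      intro res t
      simp only [List.foldl_cons, ih, rsBack, List.sum_cons, List.append_assoc,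
        List.singleton_append]
      exact Prod.ext rfl (by ring)

theorem rsBack_rev (nums : List Int) : ∀ t, rsBack (t + nums.sum) nums.reverse = (rsGo t nums).reverse := by
  induction nums using List.reverseRecOn with
  | nil => intro t; simp [rsBack, rsGo]
  | append_singleton ys y ih =>
      intro t
      rw [rsGo_append_singleton]
      simp only [List.reverse_append, List.reverse_singleton, List.singleton_append,
        rsBack, List.sum_append, List.sum_singleton]
      have h1 : t + (ys.sum + y) = t + ys.sum + y := by ring
      have h2 : t + (ys.sum + y) - y = t + ys.sum := by ring
      rw [h2, ih t, h1]

-- ===== VERDICT (by name: the statement is the Claim_ definition above) =====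
theorem runningSum1_spec : Claim_equal_runningSum1 := by
  intro nums _
  unfold Spec_runningSum1 runningSum1 runningSum1_alt
  have hA := runningSum1_loop nums nums.length le_rfl
  simp only [List.take_length] at hA
  rw [hA]
  simp only
  rw [foldl_back, List.nil_append]
  have := rsBack_rev nums 0
  rw [zero_add] at this
  rw [this, List.reverse_reverse]
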